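-- pv_equiv track=rewrite | github.com/StreakyCobra/groupman | groupman/extra/groups.py | _parse
-- ===== SOURCE A (Python) =====
-- SYM_GROUP = '@'
--
-- SYM_REMOVE = '/'
--
-- SYM_COMMENT = '#'
--
-- def _parse(lines):
--     """Parse a group file and return its dependencies and packages."""
--     # Copy the list
--     parsed = list(lines)
--     # Strip lines
--     parsed = map(lambda x: x.strip(), parsed)
--     # Remove empty lines
--     parsed = filter(lambda x: x, parsed)
--     # Remove comments
--     parsed = filter(lambda x: x[0] != SYM_COMMENT, parsed)
--     parsed = map(lambda x: x.split(SYM_COMMENT)[0].strip(), parsed)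
--     # Remove empty lines
--     parsed = list(filter(lambda x: x, parsed))
--     # Extract packages
--     packages = [x for x in parsed if x[0] != SYM_GROUP and x[0] != SYM_REMOVE]
--     # Extract depends
--     depends = [x[1:] for x in parsed if x[0] == SYM_GROUP]
--     # Extract depends
--     removed = [x[1:] for x in parsed if x[0] == SYM_REMOVE]
--     # Return the result of parsing
--     return (sorted(list(set(depends))),
--             sorted(list(set(packages))),
--             sorted(list(set(removed))))
-- ===== SOURCE B (Python) =====
-- SYM_GROUP = '@'
--
-- SYM_REMOVE = '/'
--
-- SYM_COMMENT = '#'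
--
-- def _content(line):
--     """Return the effective content of a line, or None if it carries none."""
--     line = line.strip()
--     if not line or line[0] == SYM_COMMENT:
--         return None
--     content = line.split(SYM_COMMENT)[0].strip()
--     return content or None
--
-- def _parse(lines):
--     """Parse a group file and return its dependencies and packages."""
--     # One set of cleaned entries, sigils included ('@dep', '/rem', 'pkg').
--     entries = set()
--     for line in lines:
--         content = _content(line)
--         if content is not None:
--             entries.add(content)
--     # One global sort: entries sharing a sigil share their first character,
--     # so their relative order is exactly the order of the de-sigiled names.
--     depends, packages, removed = [], [], []
--     for entry in sorted(entries):
--         if entry[0] == SYM_GROUP: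
--             depends.append(entry[1:])
--         elif entry[0] == SYM_REMOVE:
--             removed.append(entry[1:])
--         else:
--             packages.append(entry)
--     return (depends, packages, removed)
-- ===== Notes on version B (the rewrite author's own statement) =====
-- stated objective: alternative
-- what changed: Instead of A's three classified sets each sorted separately, B collects all cleaned entries (sigils included) into one set, sorts it once globally, and demultiplexes the sorted list into depends/packages/removed in a final pass, relying on the shared-first-character property to make each group come out name-sorted.
import Mathlib
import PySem

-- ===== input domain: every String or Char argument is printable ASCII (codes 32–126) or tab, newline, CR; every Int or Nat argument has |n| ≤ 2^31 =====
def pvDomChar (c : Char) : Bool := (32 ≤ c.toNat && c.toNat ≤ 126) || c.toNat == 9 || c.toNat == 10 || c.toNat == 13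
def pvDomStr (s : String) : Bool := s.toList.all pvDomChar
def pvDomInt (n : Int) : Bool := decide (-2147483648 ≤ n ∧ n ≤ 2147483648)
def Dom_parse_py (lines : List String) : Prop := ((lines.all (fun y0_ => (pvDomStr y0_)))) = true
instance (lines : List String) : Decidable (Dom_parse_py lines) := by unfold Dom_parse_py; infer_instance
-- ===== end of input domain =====

-- B collects all cleaned entries (sigils included) into ONE set, sorts it once globally,
-- and demultiplexes the sorted list into the three outputs in a final pass (objective: alternative).

-- ===== PORT A =====
-- literal transliteration of A's pipeline: strip, drop empties, drop comment lines,
-- cut trailing comments, drop empties, three classifying comprehensions, sorted(set(...)) each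
def parse_py (lines : List String) : List String × List String × List String :=
  let parsed0 := lines
  let parsed1 := parsed0.map (fun x => PySem.Str.strip x)
  let parsed2 := parsed1.filter (fun x => x != "")
  let parsed3 := parsed2.filter (fun x => !(PySem.Str.pyGet? x 0 == some '#'))
  let parsed4 := parsed3.map (fun x => PySem.Str.strip (PySem.List.pyGetD (((PySem.Str.split? x "#").getD [])) 0 ""))
  let parsed := parsed4.filter (fun x => x != "")
  let packages := parsed.filter (fun x => !(PySem.Str.pyGet? x 0 == some '@') && !(PySem.Str.pyGet? x 0 == some '/'))
  let depends := (parsed.filter (fun x => PySem.Str.pyGet? x 0 == some '@')).map (fun x => PySem.Str.slice x (some 1) none)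
  let removed := (parsed.filter (fun x => PySem.Str.pyGet? x 0 == some '/')).map (fun x => PySem.Str.slice x (some 1) none)
  (PySem.List.sorted (PySem.Set.ofList depends) (fun x => x) false,
   PySem.List.sorted (PySem.Set.ofList packages) (fun x => x) false,
   PySem.List.sorted (PySem.Set.ofList removed) (fun x => x) false)

-- ===== PORT B =====
-- helper _content of Source B: the line's effective content, or none
def contentOf (line : String) : Option String :=
  let line := PySem.Str.strip line
  if line = "" ∨ PySem.Str.pyGet? line 0 = some '#' then none
  else
    let content := PySem.Str.strip (PySem.List.pyGetD (((PySem.Str.split? line "#").getD [])) 0 "")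
    if content = "" then none else some content

-- one set of cleaned entries, one global sort, then one demultiplexing pass
def parse_py_alt (lines : List String) : List String × List String × List String :=
  let entries := lines.foldl
    (fun (s : PySem.Set String) line =>
      match contentOf line with
      | none => s
      | some content => PySem.Set.add s content)
    PySem.Set.empty
  let r := (PySem.List.sorted entries (fun x => x) false).foldl
    (fun (r : List String × List String × List String) entry =>
      if PySem.Str.pyGet? entry 0 = some '@' then
        (r.1 ++ [PySem.Str.slice entry (some 1) none], r.2.1, r.2.2)
      else if PySem.Str.pyGet? entry 0 = some '/' then
        (r.1, r.2.1, r.2.2 ++ [PySem.Str.slice entry (some 1) none])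
      else
        (r.1, r.2.1 ++ [entry], r.2.2))
    ([], [], [])
  r

-- ===== PRECONDITION & SPEC =====
def Spec_parse_py (lines : List String) (out : List String × List String × List String) : Prop := out = parse_py_alt lines
instance (lines : List String) (out : List String × List String × List String) : Decidable (Spec_parse_py lines out) := by unfold Spec_parse_py; infer_instance

-- ===== CLAIM (what is proved, stated in full; the proofs are below) =====
def Claim_equal_parse_py : Prop := ∀ (lines : List String), Dom_parse_py lines → Spec_parse_py lines (parse_py lines)

-- ===== LEMMAS AND PROOFS =====

-- A's pipeline of stages equals one filterMap of B's per-line helper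
lemma pipeline_eq (lines : List String) :
    ((((lines.map (fun x => PySem.Str.strip x)).filter (fun x => x != "")).filter
        (fun x => !(PySem.Str.pyGet? x 0 == some '#'))).map
        (fun x => PySem.Str.strip (PySem.List.pyGetD (((PySem.Str.split? x "#").getD [])) 0 ""))).filter
        (fun x => x != "")
      = lines.filterMap contentOf := by
  induction lines with
  | nil => rfl
  | cons x xs ih =>
    simp only [List.map_cons, List.filterMap_cons]
    by_cases h1 : PySem.Str.strip x = ""
    · have hb : (PySem.Str.strip x != "") = false := by rw [h1]; rfl
      have hc : contentOf x = none := by simp only [contentOf]; rw [if_pos (Or.inl h1)]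
      simp only [List.filter_cons, hb, Bool.false_eq_true, if_false, hc]
      exact ih
    · have hb : (PySem.Str.strip x != "") = true := by
        have : (PySem.Str.strip x == "") = false := beq_eq_false_iff_ne.mpr h1
        simp only [bne, this, Bool.not_false]
      simp only [List.filter_cons, hb, if_true]
      by_cases h2 : PySem.Str.pyGet? (PySem.Str.strip x) 0 = some '#'
      · have hb2 : (!(PySem.Str.pyGet? (PySem.Str.strip x) 0 == some '#')) = false := by
          rw [h2]; rfl
        have hc : contentOf x = none := by simp only [contentOf]; rw [if_pos (Or.inr h2)]
        simp only [hb2, Bool.false_eq_true, if_false, hc]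
        exact ih
      · have hb2 : (!(PySem.Str.pyGet? (PySem.Str.strip x) 0 == some '#')) = true := by
          have : (PySem.Str.pyGet? (PySem.Str.strip x) 0 == some '#') = false :=
            beq_eq_false_iff_ne.mpr h2
          rw [this]; rfl
        have hc0 : contentOf x =
            (if PySem.Str.strip (PySem.List.pyGetD (((PySem.Str.split? (PySem.Str.strip x) "#").getD [])) 0 "") = ""
             then none
             else some (PySem.Str.strip (PySem.List.pyGetD (((PySem.Str.split? (PySem.Str.strip x) "#").getD [])) 0 ""))) := by
          simp only [contentOf]
          rw [if_neg (by intro hor; rcases hor with h | h; exact h1 h; exact h2 h)]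
        simp only [List.filter_cons, hb2, if_true, List.map_cons]
        by_cases h3 : PySem.Str.strip (PySem.List.pyGetD (((PySem.Str.split? (PySem.Str.strip x) "#").getD [])) 0 "") = ""
        · have hb3 : (PySem.Str.strip (PySem.List.pyGetD (((PySem.Str.split? (PySem.Str.strip x) "#").getD [])) 0 "") != "") = false := by
            rw [h3]; rfl
          have hc : contentOf x = none := by rw [hc0, if_pos h3]
          simp only [hb3, Bool.false_eq_true, if_false, hc]
          exact ih
        · have hb3 : (PySem.Str.strip (PySem.List.pyGetD (((PySem.Str.split? (PySem.Str.strip x) "#").getD [])) 0 "") != "") = true := by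
            have : (PySem.Str.strip (PySem.List.pyGetD (((PySem.Str.split? (PySem.Str.strip x) "#").getD [])) 0 "") == "") = false :=
              beq_eq_false_iff_ne.mpr h3
            simp only [bne, this, Bool.not_false]
          have hc : contentOf x =
              some (PySem.Str.strip (PySem.List.pyGetD (((PySem.Str.split? (PySem.Str.strip x) "#").getD [])) 0 "")) := by
            rw [hc0, if_neg h3]
          simp only [hb3, if_true, hc]
          rw [ih]

-- B's collecting loop is a Set.add-fold over the cleaned contents
lemma collect_eq (lines : List String) (s : PySem.Set String) :
    lines.foldl
      (fun (s : PySem.Set String) line =>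
        match contentOf line with
        | none => s
        | some content => PySem.Set.add s content) s
    = (lines.filterMap contentOf).foldl PySem.Set.add s := by
  induction lines generalizing s with
  | nil => rfl
  | cons x xs ih =>
    simp only [List.foldl_cons, List.filterMap_cons]
    cases h : contentOf x with
    | none => exact ih s
    | some c => simp only [List.foldl_cons]; exact ih _

-- B's demultiplexing loop splits a list into the three classified lists
lemma demux_eq (es : List String) (a b c : List String) :
    es.foldl
      (fun (r : List String × List String × List String) entry =>
        if PySem.Str.pyGet? entry 0 = some '@' then
          (r.1 ++ [PySem.Str.slice entry (some 1) none], r.2.1, r.2.2)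
        else if PySem.Str.pyGet? entry 0 = some '/' then
          (r.1, r.2.1, r.2.2 ++ [PySem.Str.slice entry (some 1) none])
        else
          (r.1, r.2.1 ++ [entry], r.2.2)) (a, b, c)
    = (a ++ (es.filter (fun x => PySem.Str.pyGet? x 0 == some '@')).map (fun x => PySem.Str.slice x (some 1) none),
       b ++ es.filter (fun x => !(PySem.Str.pyGet? x 0 == some '@') && !(PySem.Str.pyGet? x 0 == some '/')),
       c ++ (es.filter (fun x => PySem.Str.pyGet? x 0 == some '/')).map (fun x => PySem.Str.slice x (some 1) none)) := by
  induction es generalizing a b c with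
  | nil => simp
  | cons x xs ih =>
    simp only [List.foldl_cons, List.filter_cons]
    by_cases h1 : PySem.Str.pyGet? x 0 = some '@'
    · have hb1 : (PySem.Str.pyGet? x 0 == some '@') = true := beq_iff_eq.mpr h1
      have hb2 : (PySem.Str.pyGet? x 0 == some '/') = false :=
        beq_eq_false_iff_ne.mpr (by rw [h1]; decide)
      simp only [if_pos h1, hb1, hb2, Bool.not_true, Bool.false_and, Bool.false_eq_true,
        if_false, if_true, List.map_cons]
      rw [ih]
      simp
    · have hb1 : (PySem.Str.pyGet? x 0 == some '@') = false := beq_eq_false_iff_ne.mpr h1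
      by_cases h2 : PySem.Str.pyGet? x 0 = some '/'
      · have hb2 : (PySem.Str.pyGet? x 0 == some '/') = true := beq_iff_eq.mpr h2
        simp only [if_neg h1, if_pos h2, hb1, hb2, Bool.not_true, Bool.not_false,
          Bool.true_and, Bool.false_eq_true, if_false, if_true, List.map_cons]
        rw [ih]
        simp
      · have hb2 : (PySem.Str.pyGet? x 0 == some '/') = false := beq_eq_false_iff_ne.mpr h2
        simp only [if_neg h1, if_neg h2, hb1, hb2, Bool.not_false, Bool.true_and, if_true]
        rw [ih]
        simp

-- set(xs) commutes with filtering
lemma filter_ofList (p : String → Bool) (xs : List String) :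
    (PySem.Set.ofList xs).filter p = PySem.Set.ofList (xs.filter p) := by
  induction xs using List.reverseRecOn with
  | nil => rfl
  | append_singleton xs x ih =>
    rw [PySem.Set.ofList_append_singleton, List.filter_append]
    by_cases hx : x ∈ xs
    · have hc : (PySem.Set.ofList xs).contains x = true :=
        (PySem.Set.contains_iff _ _).mpr ((PySem.Set.mem_ofList xs x).mpr hx)
      rw [PySem.Set.add, if_pos hc, ih]
      by_cases hp : p x = true
      · have hxf : x ∈ xs.filter p := List.mem_filter.mpr ⟨hx, hp⟩
        have hc2 : (PySem.Set.ofList (xs.filter p)).contains x = true :=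
          (PySem.Set.contains_iff _ _).mpr ((PySem.Set.mem_ofList _ x).mpr hxf)
        simp only [List.filter_cons, List.filter_nil, hp, if_true,
          PySem.Set.ofList_append_singleton, PySem.Set.add, hc2, if_true]
      · have hp' : p x = false := by revert hp; cases p x <;> simp
        simp [hp']
    · have hc : (PySem.Set.ofList xs).contains x = false := by
        revert hx
        have := PySem.Set.contains_iff (PySem.Set.ofList xs) x
        have h2 := PySem.Set.mem_ofList xs x
        cases hcc : (PySem.Set.ofList xs).contains x
        · simp
        · intro hx; exact absurd (h2.mp (this.mp hcc)) hx
      rw [PySem.Set.add, hc, if_neg (by simp), List.filter_append, ih]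
      by_cases hp : p x = true
      · have hc2 : (PySem.Set.ofList (xs.filter p)).contains x = false := by
          have h2 := PySem.Set.mem_ofList (xs.filter p) x
          have := PySem.Set.contains_iff (PySem.Set.ofList (xs.filter p)) x
          cases hcc : (PySem.Set.ofList (xs.filter p)).contains x
          · rfl
          · exact absurd (List.mem_filter.mp (h2.mp (this.mp hcc))).1 hx
        simp only [List.filter_cons, List.filter_nil, hp, if_true,
          PySem.Set.ofList_append_singleton, PySem.Set.add, hc2,
          Bool.false_eq_true, if_false]
      · have hp' : p x = false := by revert hp; cases p x <;> simp
        simp [hp']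

-- set(xs) commutes with an injective-on-xs map
lemma map_ofList_injOn (f : String → String) (xs : List String)
    (hinj : ∀ a ∈ xs, ∀ b ∈ xs, f a = f b → a = b) :
    (PySem.Set.ofList xs).map f = PySem.Set.ofList (xs.map f) := by
  induction xs using List.reverseRecOn with
  | nil => rfl
  | append_singleton xs x ih =>
    have hinj' : ∀ a ∈ xs, ∀ b ∈ xs, f a = f b → a = b := by
      intro a ha b hb
      exact hinj a (List.mem_append_left _ ha) b (List.mem_append_left _ hb)
    rw [PySem.Set.ofList_append_singleton, List.map_append, List.map_cons, List.map_nil,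
      PySem.Set.ofList_append_singleton, ← ih hinj']
    by_cases hx : x ∈ xs
    · have hc : (PySem.Set.ofList xs).contains x = true :=
        (PySem.Set.contains_iff _ _).mpr ((PySem.Set.mem_ofList xs x).mpr hx)
      have hfx : f x ∈ (PySem.Set.ofList xs).map f :=
        List.mem_map.mpr ⟨x, (PySem.Set.mem_ofList xs x).mpr hx, rfl⟩
      rw [PySem.Set.add, if_pos hc, PySem.Set.add,
        if_pos ((PySem.Set.contains_iff _ _).mpr hfx)]
    · have hc : (PySem.Set.ofList xs).contains x = false := by
        have h2 := PySem.Set.mem_ofList xs x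
        have := PySem.Set.contains_iff (PySem.Set.ofList xs) x
        cases hcc : (PySem.Set.ofList xs).contains x
        · rfl
        · exact absurd (h2.mp (this.mp hcc)) hx
      have hfx : f x ∉ (PySem.Set.ofList xs).map f := by
        intro hmem
        obtain ⟨a, ha, hfa⟩ := List.mem_map.mp hmem
        have ha' : a ∈ xs := (PySem.Set.mem_ofList xs a).mp ha
        have : a = x := hinj a (List.mem_append_left _ ha') x
          (List.mem_append_right _ (List.mem_singleton.mpr rfl)) hfa
        exact hx (this ▸ ha')
      have hc2 : PySem.Set.contains ((PySem.Set.ofList xs).map f) (f x) = false := by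
        have := PySem.Set.contains_iff ((PySem.Set.ofList xs).map f) (f x)
        cases hcc : PySem.Set.contains ((PySem.Set.ofList xs).map f) (f x)
        · rfl
        · exact absurd (this.mp hcc) hfx
      rw [PySem.Set.add, hc, if_neg (by simp), PySem.Set.add, hc2, if_neg (by simp),
        List.map_append, List.map_cons, List.map_nil]

-- a string whose char 0 is c is c-consed on the List Char side
lemma toList_of_pyGet0 (a : String) (c : Char) (h : PySem.Str.pyGet? a 0 = some c) :
    a.toList = c :: a.toList.tail := by
  have h' : PySem.List.pyGet? a.toList 0 = some c := h
  cases hl : a.toList with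
  | nil => rw [hl] at h'; simp [PySem.List.pyGet?] at h'
  | cons d t =>
    rw [hl] at h'
    have hdc : d = c := by
      simpa [PySem.List.pyGet?, PySem.List.pyIdx?] using h'
    simp [hdc]

-- s[1:] on the List Char side
lemma slice_one_toList (a : String) :
    (PySem.Str.slice a (some 1) none).toList = a.toList.tail := by
  simp [PySem.Str.slice, PySem.Chars.slice, PySem.List.slice_from_one]

-- dropping the shared leading sigil is strictly monotone …
lemma slice_lt_of_lt (c : Char) (a b : String)
    (ha : PySem.Str.pyGet? a 0 = some c) (hb : PySem.Str.pyGet? b 0 = some c)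
    (hab : a < b) :
    PySem.Str.slice a (some 1) none < PySem.Str.slice b (some 1) none := by
  rw [String.lt_iff_toList_lt] at hab ⊢
  rw [slice_one_toList, slice_one_toList]
  rw [toList_of_pyGet0 a c ha, toList_of_pyGet0 b c hb] at hab
  rcases List.cons_lt_cons_iff.mp hab with h | ⟨_, h⟩
  · exact absurd h (lt_irrefl c)
  · exact h

-- … and injective
lemma slice_inj_of_pyGet0 (c : Char) (a b : String)
    (ha : PySem.Str.pyGet? a 0 = some c) (hb : PySem.Str.pyGet? b 0 = some c)
    (h : PySem.Str.slice a (some 1) none = PySem.Str.slice b (some 1) none) :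
    a = b := by
  have ht : a.toList.tail = b.toList.tail := by
    rw [← slice_one_toList, ← slice_one_toList, h]
  apply String.toList_inj.mp
  rw [toList_of_pyGet0 a c ha, toList_of_pyGet0 b c hb, ht]

-- the sigil-c part of the one global sorted list is the sorted de-sigiled c-set
lemma comp_sigil (c : Char) (cs : List String) :
    PySem.List.sorted
      (PySem.Set.ofList ((cs.filter (fun x => PySem.Str.pyGet? x 0 == some c)).map
        (fun x => PySem.Str.slice x (some 1) none))) (fun x => x) false
    = (((PySem.List.sorted (PySem.Set.ofList cs) (fun x => x) false).filter
        (fun x => PySem.Str.pyGet? x 0 == some c)).map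
        (fun x => PySem.Str.slice x (some 1) none)) := by
  apply PySem.List.sorted_eq_of_perm_of_pairwise_lt
  · -- permutation
    have h1 : ((PySem.List.sorted (PySem.Set.ofList cs) (fun x => x) false).filter
        (fun x => PySem.Str.pyGet? x 0 == some c)).Perm
        ((PySem.Set.ofList cs).filter (fun x => PySem.Str.pyGet? x 0 == some c)) :=
      (PySem.List.sorted_perm _ _ _).filter _
    rw [filter_ofList] at h1
    have h2 := h1.map (fun x => PySem.Str.slice x (some 1) none)
    rw [map_ofList_injOn] at h2
    · exact h2
    · intro a ha b hb hfab
      exact slice_inj_of_pyGet0 c a b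
        (beq_iff_eq.mp (List.mem_filter.mp ha).2)
        (beq_iff_eq.mp (List.mem_filter.mp hb).2) hfab
  · -- strictly increasing
    apply List.pairwise_map.mpr
    apply List.Pairwise.imp_of_mem
      (R := fun a b => a < b)
    · intro a b ha hb hab
      exact slice_lt_of_lt c a b
        (beq_iff_eq.mp (List.mem_filter.mp ha).2)
        (beq_iff_eq.mp (List.mem_filter.mp hb).2) hab
    · exact (PySem.List.sorted_ofList_pairwise_lt cs).filter _

-- the unsigiled part of the one global sorted list is the sorted package set
lemma comp_plain (cs : List String) :
    PySem.List.sorted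
      (PySem.Set.ofList (cs.filter
        (fun x => !(PySem.Str.pyGet? x 0 == some '@') && !(PySem.Str.pyGet? x 0 == some '/'))))
      (fun x => x) false
    = ((PySem.List.sorted (PySem.Set.ofList cs) (fun x => x) false).filter
        (fun x => !(PySem.Str.pyGet? x 0 == some '@') && !(PySem.Str.pyGet? x 0 == some '/'))) := by
  apply PySem.List.sorted_eq_of_perm_of_pairwise_lt
  · have h1 := (PySem.List.sorted_perm (PySem.Set.ofList cs) (fun x => x) false).filter
      (fun x => !(PySem.Str.pyGet? x 0 == some '@') && !(PySem.Str.pyGet? x 0 == some '/'))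
    rw [filter_ofList] at h1
    exact h1
  · exact (PySem.List.sorted_ofList_pairwise_lt cs).filter _

-- ===== VERDICT (by name: the statement is the Claim_ definition above) =====
theorem parse_py_spec : Claim_equal_parse_py := by
  intro lines _
  show parse_py lines = parse_py_alt lines
  simp only [parse_py, parse_py_alt, pipeline_eq, collect_eq, demux_eq, PySem.Set.empty]
  rw [← PySem.Set.ofList_eq_foldl]
  rw [comp_sigil '@', comp_sigil '/', comp_plain]
  simp
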